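-- pv_equiv track=rewrite | github.com/onewave-dev/crossword_magic | utils/crossword.py | _candidate_pool
-- ===== SOURCE A (Python) =====
-- from typing import Dict, Iterable, Iterator, List, Optional, Sequence, Set, Tuple
--
-- def _normalise_word(word: str, language: str) -> str:
--     """Normalise a candidate word for placement."""
--
--     normalised = word.strip().replace(" ", "").upper()
--     if language.lower() == "ru":
--         normalised = normalised.replace("Ё", "Е")
--     return normalised
--
-- def _candidate_pool(
--     words: Iterable[str],
--     language: str,
-- ) -> Dict[int, List[str]]:
--     pool: Dict[int, List[str]] = {}
--     for word in words:
--         normalised = _normalise_word(word, language)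
--         if not normalised:
--             continue
--         pool.setdefault(len(normalised), []).append(normalised)
--     return pool
-- ===== SOURCE B (Python) =====
-- def _normalise_word(word: str, language: str) -> str:
--     normalised = word.strip().replace(" ", "").upper()
--     if language.lower() == "ru":
--         normalised = normalised.replace("Ё", "Е")
--     return normalised
--
-- def _candidate_pool(words, language):
--     norms = [n for n in (_normalise_word(w, language) for w in words) if n]
--     lengths = list(dict.fromkeys(len(n) for n in norms))
--     return {L: [n for n in norms if len(n) == L] for L in lengths}
-- ===== Notes on version B (the rewrite author's own statement) =====
-- stated objective: alternative
-- what changed: Replaced the single-pass setdefault/append hash-bucketing loop with a two-phase decomposition: normalise all words into a list once, take the distinct lengths in first-occurrence order via dict.fromkeys, then build each bucket by filtering the normalised list.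
import Mathlib
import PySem

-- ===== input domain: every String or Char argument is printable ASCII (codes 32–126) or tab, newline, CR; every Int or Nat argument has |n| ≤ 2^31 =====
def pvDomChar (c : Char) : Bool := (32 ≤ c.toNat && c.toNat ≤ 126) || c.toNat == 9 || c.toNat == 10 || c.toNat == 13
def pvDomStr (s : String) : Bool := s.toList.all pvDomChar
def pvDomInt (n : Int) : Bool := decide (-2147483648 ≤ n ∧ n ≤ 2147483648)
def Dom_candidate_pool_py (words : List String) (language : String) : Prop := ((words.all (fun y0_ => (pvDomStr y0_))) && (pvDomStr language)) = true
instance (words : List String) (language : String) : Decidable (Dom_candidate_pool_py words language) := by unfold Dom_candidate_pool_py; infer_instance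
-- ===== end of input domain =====

-- Alternative decomposition: B normalises once into a list, takes distinct lengths in
-- first-occurrence order, and builds each bucket by filtering, instead of A's
-- single-pass setdefault/append dict bucketing; same return value, similar cost.


-- ===== PORT A =====
-- _normalise_word, shared helper of both Pythons (ported once, used by both ports)
def pvNormWord (word : String) (language : String) : String :=
  let normalised := PySem.Str.upper (PySem.Str.replace (PySem.Str.strip word) " " "")
  if PySem.Str.lower language = "ru" then PySem.Str.replace normalised "Ё" "Е"
  else normalised

def candidate_pool_py (words : List String) (language : String) : List (Int × List String) :=
  (words.foldl
    (fun (pool : PySem.Dict Int (List String)) word =>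
      let normalised := pvNormWord word language
      if normalised = "" then pool
      else pool.modify (PySem.Str.len normalised) [] (· ++ [normalised]))
    PySem.Dict.empty).items

-- ===== PORT B =====
def candidate_pool_py_alt (words : List String) (language : String) : List (Int × List String) :=
  let norms := (words.map (fun w => pvNormWord w language)).filter (fun n => !(n == ""))
  let lengths := PySem.List.dedup (norms.map (fun n => PySem.Str.len n))
  lengths.map (fun L => (L, norms.filter (fun n => PySem.Str.len n == L)))

-- ===== PRECONDITION & SPEC =====
def Spec_candidate_pool_py (words : List String) (language : String) (out : List (Int × List String)) : Prop := out = candidate_pool_py_alt words language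
instance (words : List String) (language : String) (out : List (Int × List String)) : Decidable (Spec_candidate_pool_py words language out) := by unfold Spec_candidate_pool_py; infer_instance

-- ===== CLAIM (what is proved, stated in full; the proofs are below) =====
def Claim_equal_candidate_pool_py : Prop := ∀ (words : List String) (language : String), Dom_candidate_pool_py words language → Spec_candidate_pool_py words language (candidate_pool_py words language)

-- ===== LEMMAS AND PROOFS =====

-- A's loop over `words` is the grouping fold over the non-empty normalised words.
lemma pv_foldA (words : List String) (language : String) (d : PySem.Dict Int (List String)) :
    words.foldl
      (fun (pool : PySem.Dict Int (List String)) word =>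
        let normalised := pvNormWord word language
        if normalised = "" then pool
        else pool.modify (PySem.Str.len normalised) [] (· ++ [normalised])) d
    = ((words.map (fun w => pvNormWord w language)).filter (fun n => !(n == ""))).foldl
        (fun pool n => pool.modify (PySem.Str.len n) [] (· ++ [n])) d := by
  induction words generalizing d with
  | nil => rfl
  | cons w ws ih =>
      simp only [List.foldl_cons, List.map_cons, List.filter_cons]
      by_cases h : pvNormWord w language = ""
      · rw [ih]; simp [h]
      · rw [ih]; simp [h]

-- items of a dict with Nodup keys, read off as keys paired with their getD values
lemma pv_items_eq_map_keys (d : PySem.Dict Int (List String)) (h : d.keys.Nodup) :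
    d.items = d.keys.map (fun k => (k, d.getD k [])) := by
  simp only [PySem.Dict.keys, List.map_map]
  have : ∀ p ∈ d.items, (fun p : Int × List String => (p.1, d.getD p.1 [])) p = id p := by
    intro p hp
    have := PySem.Dict.getD_of_mem_items (d := d) (k := p.1) (v := p.2)
      (by simpa using hp) h (d0 := [])
    simp [this]
  calc d.items = d.items.map id := by simp
    _ = d.items.map (fun p => (p.1, d.getD p.1 [])) := (List.map_congr_left this).symm

-- value at key c of the grouping fold
lemma pv_getD_fold (norms : List String) (c : Int) :
    ((norms.foldl (fun (pool : PySem.Dict Int (List String)) n =>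
        pool.modify (PySem.Str.len n) [] (· ++ [n])) PySem.Dict.empty).getD c [])
    = norms.filter (fun n => PySem.Str.len n == c) := by
  have hmap : norms.foldl (fun (pool : PySem.Dict Int (List String)) n =>
        pool.modify (PySem.Str.len n) [] (· ++ [n])) PySem.Dict.empty
      = ((norms.map (fun n => (PySem.Str.len n, n))).foldl
          (fun (pool : PySem.Dict Int (List String)) p =>
            pool.modify p.1 [] (· ++ [p.2])) PySem.Dict.empty) := by
    rw [List.foldl_map]
  rw [hmap, PySem.Dict.getD_foldl_modify_append]
  rw [List.filter_map]
  simp [Function.comp_def]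

-- keys of the grouping fold: distinct lengths, first-occurrence order
lemma pv_keys_fold (norms : List String) :
    ((norms.foldl (fun (pool : PySem.Dict Int (List String)) n =>
        pool.modify (PySem.Str.len n) [] (· ++ [n])) PySem.Dict.empty).keys)
    = PySem.List.dedup (norms.map (fun n => PySem.Str.len n)) := by
  rw [PySem.Dict.keys_foldl_modify_key, PySem.List.dedup_eq_ofList]
  rfl

lemma pv_nodup_keys_fold (norms : List String) :
    ((norms.foldl (fun (pool : PySem.Dict Int (List String)) n =>
        pool.modify (PySem.Str.len n) [] (· ++ [n])) PySem.Dict.empty).keys).Nodup := by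
  rw [pv_keys_fold]
  exact PySem.List.nodup_dedup _

-- ===== VERDICT (by name: the statement is the Claim_ definition above) =====
theorem candidate_pool_py_spec : Claim_equal_candidate_pool_py := by
  intro words language _
  unfold Spec_candidate_pool_py candidate_pool_py candidate_pool_py_alt
  rw [pv_foldA]
  set norms := (words.map (fun w => pvNormWord w language)).filter (fun n => !(n == "")) with hn
  rw [pv_items_eq_map_keys _ (pv_nodup_keys_fold norms), pv_keys_fold]
  apply List.map_congr_left
  intro k _
  rw [pv_getD_fold]
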